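-- pv_equiv track=rewrite | github.com/Joice-O/Lema-do-Bombeamento | Lema_Bombeamento.py | linguagem_a_n_b_n
-- ===== SOURCE A (Python) =====
-- def linguagem_a_n_b_n(w):
--     n = len(w)
--     meio = 0
--     # Conta o número de 'a's e 'b's
--     count_a = 0
--     for c in w:
--         if c == 'a':
--             count_a += 1
--         else:
--             break
--     count_b = n - count_a
--     return w == 'a' * count_a + 'b' * count_b and count_a == count_b
-- ===== SOURCE B (Python) =====
-- def linguagem_a_n_b_n(w):
--     n = len(w)
--     if n % 2 != 0:
--         return False
--     h = n // 2
--     return all(c == 'a' for c in w[:h]) and all(c == 'b' for c in w[h:])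
-- ===== Notes on version B (the rewrite author's own statement) =====
-- stated objective: simpler
-- what changed: Replaces A's count-leading-a's loop plus rebuild-the-string comparison with an even-length guard and two positional half checks (first half all 'a', second half all 'b').
import Mathlib
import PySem

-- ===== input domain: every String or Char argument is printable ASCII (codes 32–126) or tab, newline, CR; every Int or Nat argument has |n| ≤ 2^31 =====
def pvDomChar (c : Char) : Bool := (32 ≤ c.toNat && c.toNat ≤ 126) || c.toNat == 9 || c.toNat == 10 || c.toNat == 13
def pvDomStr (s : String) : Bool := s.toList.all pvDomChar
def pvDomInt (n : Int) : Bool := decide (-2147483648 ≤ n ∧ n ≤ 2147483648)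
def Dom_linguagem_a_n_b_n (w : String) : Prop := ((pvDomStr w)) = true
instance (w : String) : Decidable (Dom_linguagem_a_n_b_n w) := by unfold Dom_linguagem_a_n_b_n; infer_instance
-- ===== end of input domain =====

-- B replaces A's count-leading-a's loop + rebuilt-string comparison by an even-length
-- guard and two positional half checks (simpler decomposition, same O(n) cost).

-- ===== PORT A =====
-- A's for-loop with break: counts the leading 'a's of w.
def pvCountLeadA : List Char → Nat
  | [] => 0
  | c :: r => if c == 'a' then pvCountLeadA r + 1 else 0

def linguagem_a_n_b_n (w : String) : Bool :=
  let l := w.toList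
  let n := l.length
  let count_a := pvCountLeadA l
  let count_b := n - count_a
  -- w == 'a' * count_a + 'b' * count_b and count_a == count_b
  (l == List.replicate count_a 'a' ++ List.replicate count_b 'b') && (count_a == count_b)

-- ===== PORT B =====
def linguagem_a_n_b_n_alt (w : String) : Bool :=
  let l := w.toList
  let n := l.length
  if n % 2 != 0 then false
  else
    let h := n / 2
    (l.take h).all (fun c => c == 'a') && (l.drop h).all (fun c => c == 'b')

-- ===== PRECONDITION & SPEC =====
def Spec_linguagem_a_n_b_n (w : String) (out : Bool) : Prop := out = linguagem_a_n_b_n_alt w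
instance (w : String) (out : Bool) : Decidable (Spec_linguagem_a_n_b_n w out) := by unfold Spec_linguagem_a_n_b_n; infer_instance

-- ===== CLAIM (what is proved, stated in full; the proofs are below) =====
def Claim_equal_linguagem_a_n_b_n : Prop := ∀ (w : String), Dom_linguagem_a_n_b_n w → Spec_linguagem_a_n_b_n w (linguagem_a_n_b_n w)

-- ===== LEMMAS AND PROOFS =====

theorem pvCountLeadA_rep_append (k : Nat) (l : List Char) :
    pvCountLeadA (List.replicate k 'a' ++ l) = k + pvCountLeadA l := by
  induction k with
  | zero => simp
  | succ k ih => simp [List.replicate_succ, pvCountLeadA, ih]; omega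

theorem pvCountLeadA_rep_b (k : Nat) : pvCountLeadA (List.replicate k 'b') = 0 := by
  cases k <;> simp [List.replicate_succ, pvCountLeadA]

theorem pv_key (l : List Char) :
    ((l == List.replicate (pvCountLeadA l) 'a'
          ++ List.replicate (l.length - pvCountLeadA l) 'b')
      && (pvCountLeadA l == l.length - pvCountLeadA l))
    = (if (l.length % 2 != 0) = true then false
       else (l.take (l.length / 2)).all (fun c => c == 'a')
          && (l.drop (l.length / 2)).all (fun c => c == 'b')) := by
  rw [Bool.eq_iff_iff]
  by_cases he : l.length % 2 = 0
  · simp only [he, bne_self_eq_false, Bool.false_eq_true, if_false, Bool.and_eq_true, beq_iff_eq]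
    constructor
    · rintro ⟨hl, hc⟩
      obtain ⟨ca, hca⟩ : ∃ ca, pvCountLeadA l = ca := ⟨_, rfl⟩
      rw [hca] at hl hc
      have hn : l.length = ca + (l.length - ca) := by
        conv_lhs => rw [hl]
        simp
      have hh : l.length / 2 = ca := by omega
      have hl2 : l = List.replicate ca 'a' ++ List.replicate ca 'b' := by
        rw [hl, ← hc]
      rw [hh]
      constructor
      · rw [hl2, List.take_append_of_le_length (by simp)]
        simp
      · rw [hl2, List.drop_append_of_le_length (by simp)]
        simp
    · rintro ⟨ha, hb⟩
      set h := l.length / 2 with hh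
      have hhle : h ≤ l.length := Nat.div_le_self _ _
      rw [List.all_eq_true] at ha hb
      have htake : l.take h = List.replicate h 'a' := by
        apply List.eq_replicate_iff.2
        refine ⟨by simp [Nat.min_eq_left hhle], fun b hbb => ?_⟩
        simpa using ha b hbb
      have hdrop : l.drop h = List.replicate h 'b' := by
        apply List.eq_replicate_iff.2
        refine ⟨by simp; omega, fun b hbb => ?_⟩
        simpa using hb b hbb
      have hl : l = List.replicate h 'a' ++ List.replicate h 'b' := by
        rw [← htake, ← hdrop, List.take_append_drop]
      have hca : pvCountLeadA l = h := by
        rw [hl, pvCountLeadA_rep_append, pvCountLeadA_rep_b]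
        omega
      have hlen : l.length = h + h := by
        conv_lhs => rw [hl]
        simp
      refine ⟨?_, ?_⟩
      · rw [hca, show l.length - h = h from by omega]
        exact hl
      · rw [hca]; omega
  · have : (l.length % 2 != 0) = true := by simpa using he
    simp only [this, if_true, Bool.false_eq_true, iff_false, Bool.and_eq_true, beq_iff_eq, not_and]
    intro hl hc
    exfalso
    have hn : l.length = pvCountLeadA l + (l.length - pvCountLeadA l) := by
      conv_lhs => rw [hl]
      simp
    omega

-- ===== VERDICT (by name: the statement is the Claim_ definition above) =====
theorem linguagem_a_n_b_n_spec : Claim_equal_linguagem_a_n_b_n := by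
  intro w _
  show linguagem_a_n_b_n w = linguagem_a_n_b_n_alt w
  unfold linguagem_a_n_b_n linguagem_a_n_b_n_alt
  exact pv_key w.toList
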